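-- pv_equiv track=rewrite | github.com/racetted/maestro-utils | bin/varsed.py | insideQuotes
-- ===== SOURCE A (Python) =====
-- def insideQuotes(position, singlesList, doublesList):
--
--     counter=0
--     prevPos=0
--
--     for listItem in singlesList:
--         counter+=1
--         if (counter%2 == 0):
--             if (position > prevPos and position < listItem and prevPos > 0):
--                 return True
--         else:
--             prevPos=listItem
--
--     counter=0
--     prevPos=0
--
--     for listItem in doublesList:
--         counter+=1
--         if (counter%2 == 0):
--             if (position > prevPos and position < listItem and prevPos > 0):
--                 return True
--         else:
--             prevPos=listItem
--     return False
-- ===== SOURCE B (Python) =====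
-- def insideQuotes(position, singlesList, doublesList):
--     # Divide and conquer: split the quote-position list at an even index, so the
--     # (open, close) pairing is preserved in each half; a leaf is a single pair
--     # (a trailing unpaired quote has no closer and can never enclose position).
--     def hit(lst):
--         n = len(lst)
--         if n < 2:
--             return False
--         if n < 4:
--             return 0 < lst[0] < position < lst[1]
--         m = (n // 4) * 2
--         return hit(lst[:m]) or hit(lst[m:])
--     return hit(singlesList) or hit(doublesList)
-- ===== Notes on version B (the rewrite author's own statement) =====
-- stated objective: alternative
-- what changed: Replaces A's two linear counter/prevPos state-machine scans with a divide-and-conquer recursion that splits each quote list at an even index (preserving the open/close pairing) down to single-pair leaves.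
import Mathlib
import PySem

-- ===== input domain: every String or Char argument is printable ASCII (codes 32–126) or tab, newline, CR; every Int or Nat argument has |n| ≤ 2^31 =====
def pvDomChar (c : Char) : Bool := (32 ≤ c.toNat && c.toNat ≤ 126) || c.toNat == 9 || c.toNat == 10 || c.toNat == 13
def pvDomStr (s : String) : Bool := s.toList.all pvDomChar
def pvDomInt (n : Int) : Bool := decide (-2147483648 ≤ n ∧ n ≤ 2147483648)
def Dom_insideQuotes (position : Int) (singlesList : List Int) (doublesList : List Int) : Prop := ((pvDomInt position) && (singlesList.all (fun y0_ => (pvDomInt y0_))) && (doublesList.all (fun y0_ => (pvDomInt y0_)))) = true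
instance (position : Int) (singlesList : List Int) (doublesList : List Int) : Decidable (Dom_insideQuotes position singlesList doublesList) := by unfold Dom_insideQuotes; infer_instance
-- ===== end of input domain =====

-- B replaces A's two linear counter/prevPos state-machine scans with a divide-and-conquer
-- recursion splitting each list at an even index down to single-pair leaves (alternative
-- decomposition, same O(n) cost).

-- ===== PORT A =====
-- A's for-loop with counter, prevPos and early 'return True'; the early return is the
-- 'true' branch, falling off the loop is 'false'.
def insideQuotesLoop (position : Int) (counter prevPos : Int) : List Int → Bool
  | [] => false
  | listItem :: rest =>
    let counter := counter + 1
    if PySem.Int.mod counter 2 == 0 then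
      if position > prevPos && position < listItem && prevPos > 0 then true
      else insideQuotesLoop position counter prevPos rest
    else insideQuotesLoop position counter listItem rest

def insideQuotes (position : Int) (singlesList : List Int) (doublesList : List Int) : Bool :=
  if insideQuotesLoop position 0 0 singlesList then true
  else insideQuotesLoop position 0 0 doublesList

-- ===== PORT B =====
-- Source B's recursive hit(): n, m are Python ints that stay in 0..len(lst), so Nat is exact
-- ((n // 4) * 2 on a nonnegative int = Nat division); lst[0], lst[1] are taken only when
-- 2 ≤ n so List.getD with an arbitrary default is exact there; the slices lst[:m], lst[m:]
-- with 0 ≤ m ≤ n are exactly List.take m / List.drop m (PySem.List.slice_to / slice_from);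
-- the chained '0 < lst[0] < position < lst[1]' is the conjunction of its three comparisons.
def altHit (position : Int) (lst : List Int) : Bool :=
  let n := lst.length
  if n < 2 then false
  else if n < 4 then
    decide (0 < lst.getD 0 0) && decide (lst.getD 0 0 < position) && decide (position < lst.getD 1 0)
  else
    let m := n / 4 * 2
    altHit position (lst.take m) || altHit position (lst.drop m)
termination_by lst.length
decreasing_by
  all_goals simp only [List.length_take, List.length_drop]; omega

def insideQuotes_alt (position : Int) (singlesList : List Int) (doublesList : List Int) : Bool :=
  altHit position singlesList || altHit position doublesList

-- ===== PRECONDITION & SPEC =====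
def Spec_insideQuotes (position : Int) (singlesList : List Int) (doublesList : List Int) (out : Bool) : Prop := out = insideQuotes_alt position singlesList doublesList
instance (position : Int) (singlesList : List Int) (doublesList : List Int) (out : Bool) : Decidable (Spec_insideQuotes position singlesList doublesList out) := by unfold Spec_insideQuotes; infer_instance

-- ===== CLAIM (what is proved, stated in full; the proofs are below) =====
def Claim_equal_insideQuotes : Prop := ∀ (position : Int) (singlesList : List Int) (doublesList : List Int), Dom_insideQuotes position singlesList doublesList → Spec_insideQuotes position singlesList doublesList (insideQuotes position singlesList doublesList)

-- ===== LEMMAS AND PROOFS =====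

-- proof-side helper: consecutive elements of a list paired up, a trailing odd one dropped
def pairUp : List Int → List (Int × Int)
  | a :: b :: rest => (a, b) :: pairUp rest
  | _ => []

theorem mod2_false (c : Int) (hc : PySem.Int.mod c 2 = 0) :
    (PySem.Int.mod (c + 1) 2 == 0) = false := by
  rw [PySem.Int.mod_eq_emod_of_pos (by omega)] at hc
  simp only [PySem.Int.mod_eq_emod_of_pos (show (0:Int) < 2 by omega), beq_eq_false_iff_ne,
    ne_eq]
  omega

theorem mod2_true (c : Int) (hc : PySem.Int.mod c 2 = 0) :
    (PySem.Int.mod (c + 1 + 1) 2 == 0) = true := by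
  rw [PySem.Int.mod_eq_emod_of_pos (by omega)] at hc
  simp only [PySem.Int.mod_eq_emod_of_pos (show (0:Int) < 2 by omega), beq_iff_eq]
  omega

-- A's loop is 'some consecutive pair (open, close) satisfies open < position < close, open > 0'
theorem loop_eq_pairs (position : Int) (l : List Int) :
    ∀ (c p : Int), PySem.Int.mod c 2 = 0 →
      insideQuotesLoop position c p l
        = (pairUp l).any (fun q => position > q.1 && position < q.2 && q.1 > 0) := by
  induction l using pairUp.induct with
  | case1 a b rest ih =>
    intro c p hc
    simp only [insideQuotesLoop, pairUp, List.any_cons, mod2_false c hc, mod2_true c hc,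
      Bool.false_eq_true, if_false, if_true]
    by_cases hcond : (position > a && position < b && a > 0) = true
    · simp [hcond]
    · simp only [hcond, Bool.false_eq_true, if_false, Bool.false_or]
      exact ih (c + 1 + 1) a (by have := mod2_true c hc; simpa using this)
  | case2 l hne =>
    intro c p hc
    match l, hne with
    | [], _ => simp [insideQuotesLoop, pairUp]
    | [a], _ =>
      simp only [insideQuotesLoop, mod2_false c hc, Bool.false_eq_true, if_false]
      simp [pairUp]
    | a :: b :: rest, hne => exact (hne a b rest rfl).elim

theorem pairUp_short (l : List Int) (h : l.length < 2) : pairUp l = [] := by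
  match l, h with
  | [], _ => rfl
  | [a], _ => rfl

-- splitting at an even index preserves the pairing
theorem pairUp_append (l₁ l₂ : List Int) (h : l₁.length % 2 = 0) :
    pairUp (l₁ ++ l₂) = pairUp l₁ ++ pairUp l₂ := by
  induction l₁ using pairUp.induct with
  | case1 a b rest ih =>
    simp only [List.length_cons] at h
    simp only [List.cons_append, pairUp, List.cons.injEq, true_and]
    exact ih (by omega)
  | case2 l hne =>
    match l, hne with
    | [], _ => simp [pairUp]
    | [a], _ => simp only [List.length_cons, List.length_nil] at h; omega
    | a :: b :: rest, hne => exact (hne a b rest rfl).elim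

-- B's divide and conquer computes the same 'any over consecutive pairs'
theorem altHit_eq_pairs (position : Int) (l : List Int) :
    altHit position l
      = (pairUp l).any (fun q => position > q.1 && position < q.2 && q.1 > 0) := by
  induction l using altHit.induct with
  | case1 l n h =>
    rw [show n = l.length from rfl] at h
    rw [altHit, if_pos h]
    rw [pairUp_short l (by omega)]
    simp
  | case2 l n h1 h2 =>
    rw [show n = l.length from rfl] at h1 h2
    rw [altHit, if_neg h1, if_pos h2]
    match l, h1, h2 with
    | [], h1, _ => exact absurd (by simp) h1
    | [a], h1, _ => exact absurd (by simp) h1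
    | a :: b :: t, _, h2 =>
      have ht : t.length < 2 := by
        simp only [List.length_cons] at h2; omega
      simp only [pairUp, pairUp_short t ht, List.any_cons, List.any_nil, Bool.or_false,
        List.getD_cons_zero, List.getD_cons_succ]
      rw [Bool.eq_iff_iff]
      simp only [Bool.and_eq_true, decide_eq_true_eq, gt_iff_lt]
      tauto
  | case3 l n h1 h2 m ih1 ih2 =>
    rw [show n = l.length from rfl] at h1 h2
    rw [show m = l.length / 4 * 2 from rfl] at ih1 ih2
    rw [altHit, if_neg h1, if_neg h2]
    show (altHit position (l.take (l.length / 4 * 2)) || altHit position (l.drop (l.length / 4 * 2))) = _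
    have hsplit : pairUp l
        = pairUp (l.take (l.length / 4 * 2)) ++ pairUp (l.drop (l.length / 4 * 2)) := by
      rw [← pairUp_append _ _ (by rw [List.length_take]; omega), List.take_append_drop]
    rw [ih1, ih2, hsplit, List.any_append]

-- ===== VERDICT (by name: the statement is the Claim_ definition above) =====
theorem insideQuotes_spec : Claim_equal_insideQuotes := by
  intro position singlesList doublesList _
  unfold Spec_insideQuotes insideQuotes insideQuotes_alt
  rw [loop_eq_pairs position singlesList 0 0 (by decide),
      loop_eq_pairs position doublesList 0 0 (by decide),
      altHit_eq_pairs position singlesList, altHit_eq_pairs position doublesList]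
  cases (pairUp singlesList).any _ <;> simp
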